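-- pv_equiv track=rewrite | github.com/freewayspb/engineering_AI | tools/generate_requirements_register.py | build_sheet_xml
-- ===== SOURCE A (Python) =====
-- def xml_escape(value: str) -> str:
--     return (
--         value.replace("&", "&amp;")
--         .replace("<", "&lt;")
--         .replace(">", "&gt;")
--         .replace("\"", "&quot;")
--         .replace("'", "&apos;")
--     )
--
-- def build_sheet_xml(headers, rows):
--     # Build worksheet XML with inline strings
--     cols = len(headers)
--     rows_count = 1 + len(rows)
--
--     def col_ref(col_idx: int) -> str:
--         # Convert 1-based column index to Excel letters
--         s = ""
--         x = col_idx
--         while x: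
--             x, r = divmod(x - 1, 26)
--             s = chr(65 + r) + s
--         return s
--
--     xml = []
--     xml.append('<?xml version="1.0" encoding="UTF-8"?>')
--     xml.append('<worksheet xmlns="http://schemas.openxmlformats.org/spreadsheetml/2006/main" xmlns:r="http://schemas.openxmlformats.org/officeDocument/2006/relationships">')
--     xml.append('<sheetData>')
--
--     # Header row (r=1)
--     xml.append('<row r="1">')
--     for c_idx, h in enumerate(headers, start=1):
--         cell_ref = f"{col_ref(c_idx)}1"
--         xml.append(f'<c r="{cell_ref}" t="inlineStr"><is><t>{xml_escape(str(h))}</t></is></c>')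
--     xml.append('</row>')
--
--     # Data rows
--     for r_idx, row in enumerate(rows, start=2):
--         xml.append(f'<row r="{r_idx}">')
--         for c_idx, h in enumerate(headers, start=1):
--             cell_ref = f"{col_ref(c_idx)}{r_idx}"
--             val = row.get(h, "")
--             xml.append(f'<c r="{cell_ref}" t="inlineStr"><is><t>{xml_escape(str(val))}</t></is></c>')
--         xml.append('</row>')
--
--     xml.append('</sheetData>')
--     xml.append('</worksheet>')
--     return "".join(xml)
-- ===== SOURCE B (Python) =====
-- def xml_escape(value: str) -> str:
--     return (
--         value.replace("&", "&amp;")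
--         .replace("<", "&lt;")
--         .replace(">", "&gt;")
--         .replace("\"", "&quot;")
--         .replace("'", "&apos;")
--     )
--
--
-- def _col_letter(i):
--     # 1-based column index -> Excel letters, recursively
--     if i == 0:
--         return ""
--     return _col_letter((i - 1) // 26) + chr(65 + (i - 1) % 26)
--
--
-- def build_sheet_xml(headers, rows):
--     # Table-first decomposition: one cell matrix, one uniform emission pass.
--     letters = [_col_letter(i) for i in range(1, len(headers) + 1)]
--     all_rows = [[str(h) for h in headers]] + [
--         [str(row.get(h, "")) for h in headers] for row in rows
--     ]
--     body = "".join(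
--         '<row r="%d">' % r
--         + "".join(
--             '<c r="%s%d" t="inlineStr"><is><t>%s</t></is></c>' % (L, r, xml_escape(v))
--             for L, v in zip(letters, vals)
--         )
--         + "</row>"
--         for r, vals in enumerate(all_rows, start=1)
--     )
--     return (
--         '<?xml version="1.0" encoding="UTF-8"?>'
--         + '<worksheet xmlns="http://schemas.openxmlformats.org/spreadsheetml/2006/main" xmlns:r="http://schemas.openxmlformats.org/officeDocument/2006/relationships">'
--         + "<sheetData>" + body + "</sheetData>" + "</worksheet>"
--     )
-- ===== Notes on version B (the rewrite author's own statement) =====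
-- stated objective: alternative
-- what changed: B precomputes the column letters once, builds a single unified matrix of cell strings (header row plus data rows), and emits all rows in one uniform pass over that table, instead of A's two separate emission loops with per-cell col_ref recomputation; the column-letter helper is recursive instead of A's while-loop.
import Mathlib
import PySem

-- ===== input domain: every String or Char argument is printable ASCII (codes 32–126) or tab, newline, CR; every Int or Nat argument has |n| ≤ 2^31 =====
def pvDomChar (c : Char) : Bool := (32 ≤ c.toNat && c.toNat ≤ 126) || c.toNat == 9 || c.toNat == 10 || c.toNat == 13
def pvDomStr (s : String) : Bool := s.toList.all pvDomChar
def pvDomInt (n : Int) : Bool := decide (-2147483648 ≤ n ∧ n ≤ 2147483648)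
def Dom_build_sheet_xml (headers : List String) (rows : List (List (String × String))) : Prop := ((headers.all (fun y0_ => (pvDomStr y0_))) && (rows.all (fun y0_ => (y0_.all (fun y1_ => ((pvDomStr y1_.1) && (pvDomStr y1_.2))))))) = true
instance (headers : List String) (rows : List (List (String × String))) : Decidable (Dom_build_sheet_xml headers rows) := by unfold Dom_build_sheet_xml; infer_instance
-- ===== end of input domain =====

-- B rebuilds the same worksheet XML by a table-first decomposition (one cell matrix, one uniform
-- emission pass with precomputed column letters) instead of A's separate header/data loops;
-- objective: alternative (same cost, different structure).

-- ===== PORT A =====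
def xml_escape (value : String) : String :=
  PySem.Str.replace (PySem.Str.replace (PySem.Str.replace (PySem.Str.replace
    (PySem.Str.replace value "&" "&amp;") "<" "&lt;") ">" "&gt;") "\"" "&quot;") "'" "&apos;"

-- A's inner 'while x:' loop of col_ref, with its string accumulator s
def colRefLoop (x : Nat) (s : String) : String :=
  if x = 0 then s
  else colRefLoop ((x - 1) / 26) (String.ofList [Char.ofNat (65 + (x - 1) % 26)] ++ s)
termination_by x
decreasing_by have := Nat.div_le_self (x - 1) 26; omega

def col_ref (col_idx : Nat) : String := colRefLoop col_idx ""

def build_sheet_xml (headers : List String) (rows : List (List (String × String))) : String :=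
  let xml : List String := []
  let xml := xml ++ ["<?xml version=\"1.0\" encoding=\"UTF-8\"?>"]
  let xml := xml ++ ["<worksheet xmlns=\"http://schemas.openxmlformats.org/spreadsheetml/2006/main\" xmlns:r=\"http://schemas.openxmlformats.org/officeDocument/2006/relationships\">"]
  let xml := xml ++ ["<sheetData>"]
  -- header row (r=1)
  let xml := xml ++ ["<row r=\"1\">"]
  let xml := (headers.zipIdx 1).foldl (fun acc p =>
    acc ++ ["<c r=\"" ++ (col_ref p.2 ++ "1") ++ "\" t=\"inlineStr\"><is><t>" ++ xml_escape p.1 ++ "</t></is></c>"]) xml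
  let xml := xml ++ ["</row>"]
  -- data rows (r=2,3,…)
  let xml := (rows.zipIdx 2).foldl (fun acc q =>
    let acc := acc ++ ["<row r=\"" ++ PySem.Int.toStr (q.2 : Int) ++ "\">"]
    let acc := (headers.zipIdx 1).foldl (fun acc2 p =>
      acc2 ++ ["<c r=\"" ++ (col_ref p.2 ++ PySem.Int.toStr (q.2 : Int)) ++ "\" t=\"inlineStr\"><is><t>" ++ xml_escape ((PySem.Dict.mk q.1).getD p.1 "") ++ "</t></is></c>"]) acc
    acc ++ ["</row>"]) xml
  let xml := xml ++ ["</sheetData>"]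
  let xml := xml ++ ["</worksheet>"]
  PySem.Str.join "" xml

-- ===== PORT B =====
-- Source B's recursive _col_letter
def colLetter (i : Nat) : String :=
  if i = 0 then ""
  else colLetter ((i - 1) / 26) ++ String.ofList [Char.ofNat (65 + (i - 1) % 26)]
termination_by i
decreasing_by have := Nat.div_le_self (i - 1) 26; omega

def build_sheet_xml_alt (headers : List String) (rows : List (List (String × String))) : String :=
  let letters := (List.range' 1 headers.length).map colLetter
  let allRows := headers :: rows.map (fun row => headers.map (fun h => (PySem.Dict.mk row).getD h ""))
  let body := PySem.Str.join "" ((allRows.zipIdx 1).map (fun q =>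
    "<row r=\"" ++ PySem.Int.toStr (q.2 : Int) ++ "\">" ++
    PySem.Str.join "" ((letters.zip q.1).map (fun p =>
      "<c r=\"" ++ p.1 ++ PySem.Int.toStr (q.2 : Int) ++ "\" t=\"inlineStr\"><is><t>" ++ xml_escape p.2 ++ "</t></is></c>")) ++
    "</row>"))
  "<?xml version=\"1.0\" encoding=\"UTF-8\"?>"
    ++ "<worksheet xmlns=\"http://schemas.openxmlformats.org/spreadsheetml/2006/main\" xmlns:r=\"http://schemas.openxmlformats.org/officeDocument/2006/relationships\">"
    ++ "<sheetData>" ++ body ++ "</sheetData>" ++ "</worksheet>"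

-- ===== PRECONDITION & SPEC =====
def Spec_build_sheet_xml (headers : List String) (rows : List (List (String × String))) (out : String) : Prop := out = build_sheet_xml_alt headers rows
instance (headers : List String) (rows : List (List (String × String))) (out : String) : Decidable (Spec_build_sheet_xml headers rows out) := by unfold Spec_build_sheet_xml; infer_instance

-- ===== CLAIM (what is proved, stated in full; the proofs are below) =====
def Claim_equal_build_sheet_xml : Prop := ∀ (headers : List String) (rows : List (List (String × String))), Dom_build_sheet_xml headers rows → Spec_build_sheet_xml headers rows (build_sheet_xml headers rows)

-- ===== LEMMAS AND PROOFS =====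

theorem joinE_nil : PySem.Str.join "" [] = "" := by
  rw [← String.toList_inj]
  simp [PySem.Str.toList_join, PySem.Chars.join_nil]

theorem joinE_cons (a : String) (l : List String) :
    PySem.Str.join "" (a :: l) = a ++ PySem.Str.join "" l := by
  rw [← String.toList_inj]
  cases l with
  | nil =>
    simp [PySem.Str.toList_join, PySem.Chars.join_singleton, PySem.Chars.join_nil,
      String.toList_append]
  | cons b t =>
    simp [PySem.Str.toList_join, PySem.Chars.join_cons_cons, String.toList_append]

theorem joinE_append (l₁ l₂ : List String) :
    PySem.Str.join "" (l₁ ++ l₂) = PySem.Str.join "" l₁ ++ PySem.Str.join "" l₂ := by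
  induction l₁ with
  | nil => simp [joinE_nil]
  | cons a t ih => simp [joinE_cons, ih, String.append_assoc]

theorem colRefLoop_eq (x : Nat) : ∀ s : String, colRefLoop x s = colLetter x ++ s := by
  induction x using Nat.strong_induction_on with
  | _ x ih =>
    intro s
    rw [colRefLoop, colLetter]
    by_cases h : x = 0
    · simp [h]
    · rw [if_neg h, if_neg h, ih ((x - 1) / 26) (by have := Nat.div_le_self (x - 1) 26; omega),
        String.append_assoc]

theorem col_ref_eq (i : Nat) : col_ref i = colLetter i := by
  simp [col_ref, colRefLoop_eq]

theorem toStr_one : PySem.Int.toStr ((1 : Nat) : Int) = "1" := by decide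

theorem cells_core (g : String → String) (rstr : String) :
    ∀ (hs : List String) (k : Nat),
      ((hs.zipIdx k).map (fun p =>
          "<c r=\"" ++ (colLetter p.2 ++ rstr) ++ "\" t=\"inlineStr\"><is><t>" ++ xml_escape (g p.1) ++ "</t></is></c>"))
        = (((List.range' k hs.length).map colLetter).zip (hs.map g)).map (fun p =>
          "<c r=\"" ++ p.1 ++ rstr ++ "\" t=\"inlineStr\"><is><t>" ++ xml_escape p.2 ++ "</t></is></c>") := by
  intro hs
  induction hs with
  | nil => intro k; simp
  | cons h t ih =>
    intro k
    simp only [List.zipIdx_cons, List.length_cons, List.range'_succ, List.map_cons,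
      List.zip_cons_cons]
    rw [ih]
    simp [String.append_assoc]

theorem cells_core_id (rstr : String) (hs : List String) (k : Nat) :
    ((hs.zipIdx k).map (fun p =>
        "<c r=\"" ++ (colLetter p.2 ++ rstr) ++ "\" t=\"inlineStr\"><is><t>" ++ xml_escape p.1 ++ "</t></is></c>"))
      = (((List.range' k hs.length).map colLetter).zip hs).map (fun p =>
        "<c r=\"" ++ p.1 ++ rstr ++ "\" t=\"inlineStr\"><is><t>" ++ xml_escape p.2 ++ "</t></is></c>") := by
  have h := cells_core (fun v => v) rstr hs k
  simpa using h

theorem cells_data (row : List (String × String)) (rstr : String) (hs : List String) (k : Nat) :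
    ((hs.zipIdx k).map (fun p =>
        "<c r=\"" ++ (colLetter p.2 ++ rstr) ++ "\" t=\"inlineStr\"><is><t>" ++ xml_escape ((PySem.Dict.mk row).getD p.1 "") ++ "</t></is></c>"))
      = (((List.range' k hs.length).map colLetter).zip (hs.map (fun h => (PySem.Dict.mk row).getD h ""))).map (fun p =>
        "<c r=\"" ++ p.1 ++ rstr ++ "\" t=\"inlineStr\"><is><t>" ++ xml_escape p.2 ++ "</t></is></c>") :=
  cells_core (fun h => (PySem.Dict.mk row).getD h "") rstr hs k

theorem joinE_rows {α : Type} (opn : α → String) (cl : String) (cells : α → List String) :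
    ∀ l : List α,
      PySem.Str.join "" (l.flatMap (fun q => opn q :: (cells q ++ [cl])))
        = PySem.Str.join "" (l.map (fun q => opn q ++ (PySem.Str.join "" (cells q) ++ cl))) := by
  intro l
  induction l with
  | nil => simp
  | cons a t ih =>
    simp only [List.flatMap_cons, List.map_cons, joinE_cons, joinE_append, ih,
      String.append_assoc, joinE_nil, String.empty_append]

-- ===== VERDICT (by name: the statement is the Claim_ definition above) =====
set_option maxRecDepth 8192 in
theorem build_sheet_xml_spec : Claim_equal_build_sheet_xml := by
  intro headers rows _
  unfold Spec_build_sheet_xml build_sheet_xml build_sheet_xml_alt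
  simp only [PySem.List.foldl_append_singleton_eq_map, List.append_assoc,
    PySem.List.foldl_append_eq_flatMap, col_ref_eq]
  rw [List.zipIdx_cons, List.zipIdx_map]
  simp only [List.map_cons, List.map_map, joinE_cons, joinE_append, joinE_nil,
    List.nil_append, List.singleton_append, Nat.reduceAdd, toStr_one]
  simp only [Function.comp_def]
  simp only [cells_core_id, cells_data]
  simp only [joinE_rows]
  simp [String.append_assoc]
  rw [← String.append_assoc, ← String.append_assoc]
  exact congrArg₂ (· ++ ·) (by decide) rfl
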